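-- pv_equiv track=rewrite | github.com/Cvillas91/myPython | codeWars/6kyu.py | solution
-- ===== SOURCE A (Python) =====
-- def solution(a):
--     count = 0
--     pos = 0
--
--     while True:
--         if pos < len(a) and pos >= 0 and count <= len(a):
--             pos += a[pos]
--             count += 1
--         else:
--             break
--     return count if count <= len(a) else -1
-- ===== SOURCE B (Python) =====
-- def solution(a):
--     seen = set()
--     count = 0
--     pos = 0
--     while 0 <= pos < len(a):
--         if pos in seen:
--             return -1
--         seen.add(pos)
--         pos += a[pos]
--         count += 1
--     return count
-- ===== Notes on version B (the rewrite author's own statement) =====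
-- stated objective: idiomatic
-- what changed: B detects a cycle by an explicit set of visited indices and an actual revisit, instead of A's pigeonhole step-counter bound with a post-loop count<=len(a) fixup.
import Mathlib
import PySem

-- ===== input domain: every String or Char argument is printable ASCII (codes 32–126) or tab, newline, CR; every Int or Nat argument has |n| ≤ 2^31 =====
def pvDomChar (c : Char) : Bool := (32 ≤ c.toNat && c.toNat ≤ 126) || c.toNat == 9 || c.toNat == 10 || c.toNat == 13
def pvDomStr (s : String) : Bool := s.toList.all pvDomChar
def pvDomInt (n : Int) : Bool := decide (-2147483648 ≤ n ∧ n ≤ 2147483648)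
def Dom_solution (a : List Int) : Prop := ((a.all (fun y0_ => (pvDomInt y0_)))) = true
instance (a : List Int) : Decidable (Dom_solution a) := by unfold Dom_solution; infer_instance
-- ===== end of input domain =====

-- B replaces A's pigeonhole step-counter bound (count ≤ len(a), post-loop fixup to -1)
-- by explicit cycle detection with a set of visited indices; objective: idiomatic.

-- ===== PORT A =====
-- the 'while True' loop: state (count, pos); returns the final count
def solutionLoopA (a : List Int) (count pos : Int) : Int :=
  if _h : pos < a.length ∧ 0 ≤ pos ∧ count ≤ a.length then
    solutionLoopA a (count + 1) (pos + PySem.List.pyGetD a pos 0)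
  else count
termination_by ((a.length : Int) + 1 - count).toNat
decreasing_by omega

def solution (a : List Int) : Int :=
  let count := solutionLoopA a 0 0
  if count ≤ (a.length : Int) then count else -1

-- ===== PORT B =====
-- termination helper for B's loop: visiting a fresh in-range index shrinks the unseen part of range(len a)
theorem pvFilterLt {α : Type} (l : List α) (p q : α → Bool) (hpq : ∀ x, q x = true → p x = true)
    (x : α) (hx : x ∈ l) (hp : p x = true) (hq : q x = false) :
    (l.filter q).length < (l.filter p).length := by
  induction l with
  | nil => cases hx
  | cons a l ih =>
    rcases List.mem_cons.mp hx with rfl | hx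
    · simp only [List.filter_cons, hp, hq, if_true]
      have : (l.filter q).length ≤ (l.filter p).length :=
        (List.monotone_filter_right l hpq).length_le
      simpa using Nat.lt_succ_of_le this
    · by_cases hqa : q a = true
      · have hpa := hpq a hqa
        simp only [List.filter_cons, hqa, hpa, if_true, List.length_cons]
        exact Nat.succ_lt_succ (ih hx)
      · simp only [List.filter_cons, hqa]
        by_cases hpa : p a = true
        · simp only [hpa, if_true, List.length_cons]
          exact Nat.lt_succ_of_lt (ih hx)
        · simp only [hpa]
          exact ih hx

theorem pvUnseenDec (a : List Int) (seen : PySem.Set Int) (pos : Int)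
    (h0 : 0 ≤ pos) (h1 : pos < (a.length : Int)) (h2 : PySem.Set.contains seen pos = false) :
    ((List.range a.length).filter (fun (n : Nat) => !PySem.Set.contains (PySem.Set.add seen pos) (n : Int))).length <
    ((List.range a.length).filter (fun (n : Nat) => !PySem.Set.contains seen (n : Int))).length := by
  have hcast : ((pos.toNat : Nat) : Int) = pos := by omega
  refine pvFilterLt (List.range a.length) _ _ ?_ pos.toNat ?_ ?_ ?_
  · intro x hx
    simp only [Bool.not_eq_true'] at hx ⊢
    rw [← Bool.not_eq_true] at hx ⊢
    rw [PySem.Set.contains_iff] at hx ⊢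
    rw [PySem.Set.mem_add] at hx
    tauto
  · simp only [List.mem_range]; omega
  · simp only [Bool.not_eq_true', hcast, h2]
  · have hc : PySem.Set.contains (PySem.Set.add seen pos) pos = true :=
      (PySem.Set.contains_iff _ _).mpr (by rw [PySem.Set.mem_add]; exact Or.inr rfl)
    simp only [hcast, hc, Bool.not_true]

def solutionLoopB (a : List Int) (seen : PySem.Set Int) (count pos : Int) : Int :=
  if h : 0 ≤ pos ∧ pos < (a.length : Int) then
    if PySem.Set.contains seen pos then -1
    else solutionLoopB a (PySem.Set.add seen pos) (count + 1) (pos + PySem.List.pyGetD a pos 0)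
  else count
termination_by ((List.range a.length).filter (fun (n : Nat) => !PySem.Set.contains seen (n : Int))).length
decreasing_by exact pvUnseenDec a seen pos h.1 h.2 (by simp_all)

def solution_alt (a : List Int) : Int := solutionLoopB a PySem.Set.empty 0 0

-- ===== PRECONDITION & SPEC =====
def Spec_solution (a : List Int) (out : Int) : Prop := out = solution_alt a
instance (a : List Int) (out : Int) : Decidable (Spec_solution a out) := by unfold Spec_solution; infer_instance

-- ===== CLAIM (what is proved, stated in full; the proofs are below) =====
def Claim_equal_solution : Prop := ∀ (a : List Int), Dom_solution a → Spec_solution a (solution a)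

-- ===== LEMMAS AND PROOFS =====

-- a nodup list of integers all in [0, n) has at most n elements
theorem pvCardBound (l : List Int) (n : Nat) (hnd : l.Nodup)
    (h : ∀ x ∈ l, 0 ≤ x ∧ x < (n : Int)) : l.length ≤ n := by
  have hmapnd : (l.map Int.toNat).Nodup := by
    refine hnd.map_on ?_
    intro x hx y hy hxy
    have := (h x hx).1; have := (h y hy).1
    omega
  have hsub : (l.map Int.toNat).toFinset ⊆ Finset.range n := by
    intro x hx
    simp only [List.mem_toFinset, List.mem_map] at hx
    obtain ⟨y, hy, rfl⟩ := hx
    have := (h y hy).1; have := (h y hy).2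
    simp only [Finset.mem_range]
    omega
  calc l.length = (l.map Int.toNat).length := (List.length_map _).symm
    _ = (l.map Int.toNat).toFinset.card := (List.toFinset_card_of_nodup hmapnd).symm
    _ ≤ (Finset.range n).card := Finset.card_le_card hsub
    _ = n := Finset.card_range n

-- if the walk is inside a step-closed set of in-range indices, A's count blows past len(a)
theorem pvLoopACycle (a : List Int) (S : List Int)
    (hS : ∀ x ∈ S, 0 ≤ x ∧ x < (a.length : Int) ∧ x + PySem.List.pyGetD a x 0 ∈ S) :
    ∀ count pos, pos ∈ S → (a.length : Int) < solutionLoopA a count pos := by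
  intro count pos hpos
  by_cases hc : count ≤ (a.length : Int)
  · rw [solutionLoopA]
    have h := hS pos hpos
    rw [dif_pos ⟨h.2.1, h.1, hc⟩]
    exact pvLoopACycle a S hS (count + 1) _ h.2.2
  · rw [solutionLoopA, dif_neg (by tauto)]
    omega
termination_by count => ((a.length : Int) + 1 - count).toNat
decreasing_by omega

-- main synchronization: A's loop + post-fixup equals B's loop, under B's visited-set invariant
theorem pvSync (a : List Int) (seen : PySem.Set Int) (count pos : Int)
    (hnd : seen.Nodup) (hcnt : count = (seen.length : Int))
    (hinv : ∀ x ∈ seen, 0 ≤ x ∧ x < (a.length : Int) ∧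
      (x + PySem.List.pyGetD a x 0 ∈ seen ∨ x + PySem.List.pyGetD a x 0 = pos)) :
    (if solutionLoopA a count pos ≤ (a.length : Int) then solutionLoopA a count pos else -1)
      = solutionLoopB a seen count pos := by
  have hbound : (seen.length : Int) ≤ (a.length : Int) := by
    have := pvCardBound seen a.length hnd (fun x hx => ⟨(hinv x hx).1, (hinv x hx).2.1⟩)
    omega
  by_cases hb : 0 ≤ pos ∧ pos < (a.length : Int)
  · by_cases hmem : pos ∈ seen
    · -- revisit: B returns -1; A never escapes, count exceeds len(a)
      rw [solutionLoopB, dif_pos hb, if_pos ((PySem.Set.contains_iff _ _).mpr hmem)]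
      have hclosed : ∀ x ∈ seen, 0 ≤ x ∧ x < (a.length : Int) ∧
          x + PySem.List.pyGetD a x 0 ∈ seen := by
        intro x hx
        refine ⟨(hinv x hx).1, (hinv x hx).2.1, ?_⟩
        rcases (hinv x hx).2.2 with h | h
        · exact h
        · exact h ▸ hmem
      have := pvLoopACycle a seen hclosed count pos hmem
      rw [if_neg (by omega)]
    · -- fresh index: both loops take one synchronized step
      have hcont : PySem.Set.contains seen pos = false := by
        simpa using hmem
      have hB : solutionLoopB a seen count pos
          = solutionLoopB a (PySem.Set.add seen pos) (count + 1) (pos + PySem.List.pyGetD a pos 0) := by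
        rw [solutionLoopB, dif_pos hb,
          if_neg (show ¬(PySem.Set.contains seen pos = true) by simpa using hmem)]
      have hA : solutionLoopA a count pos
          = solutionLoopA a (count + 1) (pos + PySem.List.pyGetD a pos 0) := by
        rw [solutionLoopA, dif_pos ⟨hb.2, hb.1, by omega⟩]
      rw [hA, hB]
      have hadd : PySem.Set.add seen pos = seen ++ [pos] := by
        simp only [PySem.Set.add, hcont]; simp
      refine pvSync a (PySem.Set.add seen pos) (count + 1) (pos + PySem.List.pyGetD a pos 0)
        (PySem.Set.nodup_add _ _ hnd) ?_ ?_
      · rw [hadd]; simp [hcnt]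
      · intro x hx
        rw [PySem.Set.mem_add] at hx
        rcases hx with hx | rfl
        · refine ⟨(hinv x hx).1, (hinv x hx).2.1, ?_⟩
          rcases (hinv x hx).2.2 with h | h
          · exact Or.inl (by rw [PySem.Set.mem_add]; exact Or.inl h)
          · exact Or.inl (by rw [PySem.Set.mem_add]; exact Or.inr h)
        · exact ⟨hb.1, hb.2, Or.inr rfl⟩
  · -- out of bounds: both return count (A's count is always ≤ len(a) here)
    rw [solutionLoopB, dif_neg hb]
    rw [solutionLoopA, dif_neg (by tauto)]
    rw [if_pos (by omega)]
termination_by ((List.range a.length).filter (fun (n : Nat) => !PySem.Set.contains seen (n : Int))).length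
decreasing_by exact pvUnseenDec a seen pos hb.1 hb.2 hcont

-- ===== VERDICT (by name: the statement is the Claim_ definition above) =====
theorem solution_spec : Claim_equal_solution := by
  intro a _
  unfold Spec_solution solution solution_alt
  exact pvSync a PySem.Set.empty 0 0 (by simp [PySem.Set.empty]) (by simp [PySem.Set.empty])
    (by simp [PySem.Set.empty])
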